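-- pv_equiv track=rewrite | github.com/sam676/PythonPracticeProblems | Robin/removeFirstVowel.py | removeFirstVowel
-- ===== SOURCE A (Python) =====
-- def removeFirstVowel(word):
--     reverseWord = word[::-1]
--     newWord = []
--     newWordStr = ""
--     count = 0
--     for x in reverseWord:
--         newWord += x
--         if x in ("aeiou"):
--             count += 1
--             if count == 1:
--                 newWord.pop()
--     for x in newWord:
--         newWordStr += x
--     return newWordStr[::-1]
-- ===== SOURCE B (Python) =====
-- def removeFirstVowel(word):
--     last = -1
--     for i, c in enumerate(word):
--         if c in "aeiou":
--             last = i
--     if last == -1: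
--         return word
--     return word[:last] + word[last + 1:]
-- ===== Notes on version B (the rewrite author's own statement) =====
-- stated objective: simpler
-- what changed: B makes one forward pass recording the index of the last lowercase vowel and slices that single character out, replacing A's reverse / char-list build / pop / re-reverse pipeline.
import Mathlib
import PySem

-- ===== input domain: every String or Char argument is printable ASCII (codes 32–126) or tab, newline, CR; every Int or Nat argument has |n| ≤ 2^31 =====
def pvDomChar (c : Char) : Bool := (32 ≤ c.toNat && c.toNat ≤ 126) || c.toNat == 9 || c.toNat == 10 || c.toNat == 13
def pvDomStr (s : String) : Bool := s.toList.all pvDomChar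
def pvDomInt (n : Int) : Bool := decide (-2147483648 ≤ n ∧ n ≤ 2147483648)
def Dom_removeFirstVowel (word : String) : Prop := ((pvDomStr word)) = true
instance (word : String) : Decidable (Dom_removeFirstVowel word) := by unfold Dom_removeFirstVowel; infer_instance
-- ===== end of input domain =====

-- B replaces A's reverse / char-list build / pop / re-reverse pipeline with one forward
-- pass that records the index of the last lowercase vowel and slices that character out
-- (objective: simpler).


-- `x in "aeiou"` for a single character x: membership among the vowel characters (exact).
def pvVowel (c : Char) : Bool := c == 'a' || c == 'e' || c == 'i' || c == 'o' || c == 'u'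

-- ===== PORT A =====
def removeFirstVowel (word : String) : String :=
  -- word[::-1]; step -1 never raises, so getD is never taken
  let reverseWord := (PySem.Str.slice? word none none (-1)).getD ""
  let st := reverseWord.toList.foldl
    (fun (st : List Char × Int) x =>
      let newWord := st.1 ++ [x]
      if pvVowel x then
        let count := st.2 + 1
        -- list.pop() on the (here nonempty) list drops its last element
        if count == 1 then (newWord.dropLast, count) else (newWord, count)
      else (newWord, st.2)) ([], 0)
  let newWordStr := st.1.foldl (fun s x => String.ofList (s.toList ++ [x])) ""
  (PySem.Str.slice? newWordStr none none (-1)).getD ""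

-- ===== PORT B =====
def removeFirstVowel_alt (word : String) : String :=
  let last := (PySem.List.enumerate word.toList 0).foldl
    (fun last p => if pvVowel p.2 then p.1 else last) (-1 : Int)
  if last == -1 then word
  else
    -- word[:last] + word[last+1:], built through the character list
    String.ofList (PySem.List.slice word.toList none (some last) ++
                   PySem.List.slice word.toList (some (last + 1)) none)

-- ===== PRECONDITION & SPEC =====
def Spec_removeFirstVowel (word : String) (out : String) : Prop := out = removeFirstVowel_alt word
instance (word : String) (out : String) : Decidable (Spec_removeFirstVowel word out) := by unfold Spec_removeFirstVowel; infer_instance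

-- ===== CLAIM (what is proved, stated in full; the proofs are below) =====
def Claim_equal_removeFirstVowel : Prop := ∀ (word : String), Dom_removeFirstVowel word → Spec_removeFirstVowel word (removeFirstVowel word)

-- ===== LEMMAS AND PROOFS =====

-- remove-first-vowel on a character list: characterisation of A's first loop
def rfv : List Char → List Char
  | [] => []
  | x :: xs => if pvVowel x then xs else x :: rfv xs

-- B's fold over the enumeration: index of the last vowel, -1 if none
def lastIdx (l : List Char) : Int :=
  (PySem.List.enumerate l 0).foldl (fun last p => if pvVowel p.2 then p.1 else last) (-1 : Int)

theorem lastIdx_append (l : List Char) (x : Char) :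
    lastIdx (l ++ [x]) = if pvVowel x then (l.length : Int) else lastIdx l := by
  simp [lastIdx, PySem.List.enumerate_append, List.foldl_append]

theorem lastIdx_bounds (l : List Char) :
    lastIdx l = -1 ∨ ∃ k : Nat, lastIdx l = (k : Int) ∧ k < l.length := by
  induction l using List.reverseRecOn with
  | nil => left; rfl
  | append_singleton l x ih =>
    rw [lastIdx_append]
    by_cases h : pvVowel x
    · right; exact ⟨l.length, by simp [h]⟩
    · simp only [h, Bool.false_eq_true, if_false]
      rcases ih with h1 | ⟨k, hk, hlt⟩
      · left; exact h1
      · right; exact ⟨k, hk, by simpa using Nat.lt_succ_of_lt hlt⟩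

-- A's loop body, named for the proofs (identical to the lambda in the port)
def stepA (st : List Char × Int) (x : Char) : List Char × Int :=
  let newWord := st.1 ++ [x]
  if pvVowel x then
    let count := st.2 + 1
    if count == 1 then (newWord.dropLast, count) else (newWord, count)
  else (newWord, st.2)

-- A's first loop, from a state whose count is already positive: appends the rest
theorem foldA_pos (l : List Char) (acc : List Char) (c : Int) (hc : 1 ≤ c) :
    (l.foldl stepA (acc, c)).1 = acc ++ l := by
  induction l generalizing acc c with
  | nil => simp
  | cons x xs ih =>
    rw [List.foldl_cons]
    by_cases h : pvVowel x
    · rw [show stepA (acc, c) x = (acc ++ [x], c + 1) from by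
        simp [stepA, h, show (c + 1 == 1) = false from by rw [beq_eq_false_iff_ne]; omega]]
      rw [ih _ _ (by omega)]; simp
    · rw [show stepA (acc, c) x = (acc ++ [x], c) from by simp [stepA, h]]
      rw [ih _ _ hc]; simp

-- A's first loop from count 0 computes acc ++ rfv l
theorem foldA_zero (l : List Char) (acc : List Char) :
    (l.foldl stepA (acc, 0)).1 = acc ++ rfv l := by
  induction l generalizing acc with
  | nil => simp [rfv]
  | cons x xs ih =>
    rw [List.foldl_cons]
    by_cases h : pvVowel x
    · rw [show stepA (acc, 0) x = (acc, 1) from by simp [stepA, h]]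
      rw [foldA_pos xs acc 1 (by omega), rfv, if_pos h]
    · rw [show stepA (acc, 0) x = (acc ++ [x], 0) from by simp [stepA, h]]
      rw [ih (acc ++ [x]), rfv, if_neg (by simp [h])]
      simp

-- A's second loop builds the string of its list
theorem foldStr (l : List Char) (s : String) :
    (l.foldl (fun s x => String.ofList (s.toList ++ [x])) s).toList = s.toList ++ l := by
  induction l generalizing s with
  | nil => simp
  | cons x xs ih =>
    rw [List.foldl_cons, ih]
    simp

theorem removeFirstVowel_toList (word : String) :
    (removeFirstVowel word).toList = (rfv word.toList.reverse).reverse := by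
  unfold removeFirstVowel
  rw [PySem.Str.slice?_none_none_neg_one]
  simp only [Option.getD_some, String.toList_ofList]
  have hfun : (fun (st : List Char × Int) (x : Char) =>
      let newWord := st.1 ++ [x]
      if pvVowel x then
        let count := st.2 + 1
        if count == 1 then (newWord.dropLast, count) else (newWord, count)
      else (newWord, st.2)) = stepA := rfl
  rw [hfun, foldA_zero, List.nil_append, PySem.Str.slice?_none_none_neg_one]
  simp only [Option.getD_some, String.toList_ofList]
  rw [foldStr]
  simp

theorem rfv_no_vowel (l : List Char) (h : ∀ x ∈ l, pvVowel x = false) : rfv l = l := by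
  induction l with
  | nil => rfl
  | cons x xs ih =>
    simp only [rfv, h x (by simp)]
    rw [ih (fun y hy => h y (by simp [hy]))]
    simp

theorem lastIdx_neg_no_vowel (l : List Char) (h : lastIdx l = -1) :
    ∀ x ∈ l, pvVowel x = false := by
  induction l using List.reverseRecOn with
  | nil => simp
  | append_singleton l x ih =>
    rw [lastIdx_append] at h
    by_cases hx : pvVowel x
    · simp [hx] at h
    · simp only [hx, Bool.false_eq_true, if_false] at h
      intro y hy
      rcases List.mem_append.mp hy with hy | hy
      · exact ih h y hy
      · simp at hy; subst hy; simpa using hx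

-- the core equality, by induction from the right
theorem core (l : List Char) :
    (if lastIdx l == -1 then l
     else PySem.List.slice l none (some (lastIdx l)) ++
          PySem.List.slice l (some (lastIdx l + 1)) none) = (rfv l.reverse).reverse := by
  induction l using List.reverseRecOn with
  | nil => simp [lastIdx, PySem.List.enumerate, rfv]
  | append_singleton l x ih =>
    rw [lastIdx_append]
    have hrev : (l ++ [x]).reverse = x :: l.reverse := by simp
    by_cases h : pvVowel x
    · have hne : (((l.length : Int)) == -1) = false := by
        rw [beq_eq_false_iff_ne]; omega
      simp only [h, if_true, hne, Bool.false_eq_true, if_false, hrev, rfv, if_true]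
      rw [PySem.List.slice_to_natCast]
      rw [show ((l.length : Int) + 1) = ((l.length + 1 : Nat) : Int) by push_cast; ring]
      rw [PySem.List.slice_from_natCast]
      simp
    · simp only [h, Bool.false_eq_true, if_false, hrev, rfv, List.reverse_cons]
      rcases lastIdx_bounds l with hneg | ⟨k, hk, hlt⟩
      · rw [hneg]
        simp only [BEq.rfl, if_true]
        have hnv := rfv_no_vowel l.reverse
          (fun y hy => lastIdx_neg_no_vowel l hneg y (by simpa using hy))
        rw [hnv] at ih ⊢
        simp
      · rw [hk] at ih ⊢
        have hne : (((k : Int)) == -1) = false := by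
          rw [beq_eq_false_iff_ne]; omega
        rw [hne] at ih ⊢
        simp only [Bool.false_eq_true, if_false] at ih ⊢
        rw [PySem.List.slice_to_natCast] at ih ⊢
        rw [show ((k : Int) + 1) = ((k + 1 : Nat) : Int) by push_cast; ring] at ih ⊢
        rw [PySem.List.slice_from_natCast] at ih ⊢
        rw [List.take_append_of_le_length (by omega),
            List.drop_append_of_le_length (by omega), ← ih]
        simp

-- ===== VERDICT (by name: the statement is the Claim_ definition above) =====
theorem removeFirstVowel_spec : Claim_equal_removeFirstVowel := by
  intro word _
  unfold Spec_removeFirstVowel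
  apply String.toList_inj.mp
  rw [removeFirstVowel_toList, ← core word.toList]
  unfold removeFirstVowel_alt
  rw [show (PySem.List.enumerate word.toList 0).foldl
        (fun last p => if pvVowel p.2 then p.1 else last) (-1 : Int) = lastIdx word.toList from rfl]
  by_cases h : lastIdx word.toList == -1
  · simp [h]
  · simp only [h, Bool.false_eq_true, if_false, String.toList_ofList]
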